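-- pv_equiv track=rewrite | github.com/John0Day/MSOR-KLU2026 | experiments/evaluate_agents.py | _material_balance_black
-- ===== SOURCE A (Python) =====
-- def _material_balance_black(board: list[list[str]]) -> int:
--     values = {"b": 1, "B": 2, "r": 1, "R": 2}
--     black = 0
--     red = 0
--     for row in board:
--         for p in row:
--             if p in ("b", "B"):
--                 black += values[p]
--             elif p in ("r", "R"):
--                 red += values[p]
--     return black - red
-- ===== SOURCE B (Python) =====
-- def _material_balance_black(board: list[list[str]]) -> int:
--     flat = [p for row in board for p in row]
--     return flat.count("b") + 2 * flat.count("B") - flat.count("r") - 2 * flat.count("R")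
-- ===== Notes on version B (the rewrite author's own statement) =====
-- stated objective: idiomatic
-- what changed: Replaces A's per-cell branch with two running accumulators by flattening the board once and issuing four independent list.count passes, combining the four counts arithmetically.
import Mathlib
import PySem

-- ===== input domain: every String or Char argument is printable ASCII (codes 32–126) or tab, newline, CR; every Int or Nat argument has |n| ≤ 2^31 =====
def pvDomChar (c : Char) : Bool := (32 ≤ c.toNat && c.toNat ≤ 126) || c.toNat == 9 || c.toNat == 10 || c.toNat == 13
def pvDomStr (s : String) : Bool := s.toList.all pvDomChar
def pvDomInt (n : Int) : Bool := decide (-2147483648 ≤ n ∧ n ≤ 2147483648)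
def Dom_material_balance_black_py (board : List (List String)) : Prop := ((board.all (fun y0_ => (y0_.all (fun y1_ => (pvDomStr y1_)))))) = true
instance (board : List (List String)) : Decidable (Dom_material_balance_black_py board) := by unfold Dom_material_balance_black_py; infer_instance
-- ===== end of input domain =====

-- B flattens the board once and derives the balance from four independent list.count
-- passes instead of A's per-cell branch with two running accumulators; idiomatic, same cost.

-- ===== PORT A =====
def material_balance_black_py (board : List (List String)) : Int :=
  let values : PySem.Dict String Int := PySem.Dict.ofList [("b", 1), ("B", 2), ("r", 1), ("R", 2)]
  let acc := board.foldl (fun (acc : Int × Int) row =>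
    row.foldl (fun (acc : Int × Int) p =>
      if p = "b" ∨ p = "B" then (acc.1 + values.getD p 0, acc.2)
      else if p = "r" ∨ p = "R" then (acc.1, acc.2 + values.getD p 0)
      else acc) acc) (0, 0)
  acc.1 - acc.2

-- ===== PORT B =====
def material_balance_black_py_alt (board : List (List String)) : Int :=
  let flat : List String := board.flatten
  (PySem.List.count flat "b" : Int) + 2 * (PySem.List.count flat "B" : Int)
    - (PySem.List.count flat "r" : Int) - 2 * (PySem.List.count flat "R" : Int)

-- ===== PRECONDITION & SPEC =====
def Spec_material_balance_black_py (board : List (List String)) (out : Int) : Prop := out = material_balance_black_py_alt board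
instance (board : List (List String)) (out : Int) : Decidable (Spec_material_balance_black_py board out) := by unfold Spec_material_balance_black_py; infer_instance

-- ===== CLAIM (what is proved, stated in full; the proofs are below) =====
def Claim_equal_material_balance_black_py : Prop := ∀ (board : List (List String)), Dom_material_balance_black_py board → Spec_material_balance_black_py board (material_balance_black_py board)

-- ===== LEMMAS AND PROOFS =====

-- A's accumulator over a flat list of cells, characterised by counts.
theorem pvA_foldl_counts (xs : List String) (b r : Int) :
    xs.foldl (fun (acc : Int × Int) p =>
      if p = "b" ∨ p = "B" then (acc.1 + (PySem.Dict.ofList [("b", (1:Int)), ("B", 2), ("r", 1), ("R", 2)]).getD p 0, acc.2)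
      else if p = "r" ∨ p = "R" then (acc.1, acc.2 + (PySem.Dict.ofList [("b", (1:Int)), ("B", 2), ("r", 1), ("R", 2)]).getD p 0)
      else acc) (b, r)
    = (b + (xs.count "b" : Int) + 2 * (xs.count "B" : Int), r + (xs.count "r" : Int) + 2 * (xs.count "R" : Int)) := by
  have g1 : (PySem.Dict.ofList [("b", (1:Int)), ("B", 2), ("r", 1), ("R", 2)]).getD "b" 0 = 1 := by decide
  have g2 : (PySem.Dict.ofList [("b", (1:Int)), ("B", 2), ("r", 1), ("R", 2)]).getD "B" 0 = 2 := by decide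
  have g3 : (PySem.Dict.ofList [("b", (1:Int)), ("B", 2), ("r", 1), ("R", 2)]).getD "r" 0 = 1 := by decide
  have g4 : (PySem.Dict.ofList [("b", (1:Int)), ("B", 2), ("r", 1), ("R", 2)]).getD "R" 0 = 2 := by decide
  induction xs generalizing b r with
  | nil => simp
  | cons x xs ih =>
    by_cases hb : x = "b" ∨ x = "B"
    · rcases hb with h | h <;> subst h <;>
        simp [List.foldl_cons, ih, Prod.ext_iff, g1, g2] <;> omega
    · by_cases hr : x = "r" ∨ x = "R"
      · rcases hr with h | h <;> subst h <;>
          simp [List.foldl_cons, ih, Prod.ext_iff, g3, g4] <;> omega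
      · have h1 : x ≠ "b" := fun h => hb (Or.inl h)
        have h2 : x ≠ "B" := fun h => hb (Or.inr h)
        have h3 : x ≠ "r" := fun h => hr (Or.inl h)
        have h4 : x ≠ "R" := fun h => hr (Or.inr h)
        simp [List.foldl_cons, ih, h1, h2, h3, h4]

-- ===== VERDICT (by name: the statement is the Claim_ definition above) =====
theorem material_balance_black_py_spec : Claim_equal_material_balance_black_py := by
  intro board _
  unfold Spec_material_balance_black_py material_balance_black_py material_balance_black_py_alt
  have hA : board.foldl (fun (acc : Int × Int) row =>
      row.foldl (fun (acc : Int × Int) p =>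
        if p = "b" ∨ p = "B" then (acc.1 + (PySem.Dict.ofList [("b", (1:Int)), ("B", 2), ("r", 1), ("R", 2)]).getD p 0, acc.2)
        else if p = "r" ∨ p = "R" then (acc.1, acc.2 + (PySem.Dict.ofList [("b", (1:Int)), ("B", 2), ("r", 1), ("R", 2)]).getD p 0)
        else acc) acc) (0, 0)
      = (0 + (board.flatten.count "b" : Int) + 2 * (board.flatten.count "B" : Int),
         0 + (board.flatten.count "r" : Int) + 2 * (board.flatten.count "R" : Int)) := by
    rw [← List.foldl_flatten]; exact pvA_foldl_counts board.flatten 0 0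
  simp only [hA, PySem.List.count_eq]
  ring
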